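-- pv_equiv track=rewrite | github.com/huragok/LeetCode-Practce | 264 - Paint House 2/ph2.py | findMinTwo
-- ===== SOURCE A (Python) =====
-- def findMinTwo(cost):
--     # Find the index of the first and second smallest cost
--     idx_0 = None
--     idx_1 = None
--     min_cost = None
--     min_second_cost = None
--     for idx, c in enumerate(cost):
--         if min_cost is None or c < min_cost:
--             idx_1 = idx_0
--             idx_0 = idx
--             min_second_cost = min_cost
--             min_cost = c
--         elif min_second_cost is None or c < min_second_cost:
--             idx_1 = idx
--             min_second_cost = c
--
--     return (idx_0, idx_1)
-- ===== SOURCE B (Python) =====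
-- def findMinTwo(cost):
--     pairs = [(c, i) for i, c in enumerate(cost)]
--     if not pairs:
--         return (None, None)
--     c0, i0 = min(pairs)
--     rest = [p for p in pairs if p[1] != i0]
--     if not rest:
--         return (i0, None)
--     c1, i1 = min(rest)
--     return (i0, i1)
-- ===== Notes on version B (the rewrite author's own statement) =====
-- stated objective: simpler
-- what changed: Replaces A's single-pass tracking of four state variables (two indices, min and second-min) by two passes of Python's built-in min over (cost, index) pairs: the lexicographic min gives the first smallest index, and min over the pairs with that index removed gives the second.
import Mathlib
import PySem

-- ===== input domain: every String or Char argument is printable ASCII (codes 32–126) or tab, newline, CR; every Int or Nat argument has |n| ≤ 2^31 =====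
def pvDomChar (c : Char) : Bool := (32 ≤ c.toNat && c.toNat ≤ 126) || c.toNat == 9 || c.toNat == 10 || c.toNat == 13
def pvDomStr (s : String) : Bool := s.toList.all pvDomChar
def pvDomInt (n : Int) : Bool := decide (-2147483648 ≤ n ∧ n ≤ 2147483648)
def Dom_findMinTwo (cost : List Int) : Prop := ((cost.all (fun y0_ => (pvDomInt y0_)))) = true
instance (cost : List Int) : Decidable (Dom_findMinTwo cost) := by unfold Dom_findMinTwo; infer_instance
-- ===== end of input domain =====

-- B replaces A's single-pass four-variable min/second-min tracking by two passes of
-- Python's built-in min over (cost, index) pairs (objective: simpler); equivalence proved on all inputs.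


-- ===== PORT A =====
-- the body of A's 'for idx, c in enumerate(cost)' loop, acting on (idx_0, idx_1, min_cost, min_second_cost)
def findMinTwoStep (st : Option Int × Option Int × Option Int × Option Int) (p : Int × Int) :
    Option Int × Option Int × Option Int × Option Int :=
  match st, p with
  | (i0, i1, m, m2), (idx, c) =>
    match m with
    | none => (some idx, i0, some c, m)              -- min_cost is None
    | some mv =>
      if c < mv then (some idx, i0, some c, m)       -- c < min_cost
      else
        match m2 with
        | none => (i0, some idx, m, some c)          -- min_second_cost is None
        | some m2v =>
          if c < m2v then (i0, some idx, m, some c)  -- c < min_second_cost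
          else (i0, i1, m, m2)

def findMinTwo (cost : List Int) : Option Int × Option Int :=
  let s := (PySem.List.enumerate cost).foldl findMinTwoStep (none, none, none, none)
  (s.1, s.2.1)

-- ===== PORT B =====
def findMinTwo_alt (cost : List Int) : Option Int × Option Int :=
  let pairs := (PySem.List.enumerate cost).map (fun p => (p.2, p.1))  -- [(c, i) for i, c in enumerate(cost)]
  match PySem.List.min2? pairs Prod.fst Prod.snd with                 -- min(pairs)  (tuple = lexicographic)
  | none => (none, none)                                              -- if not pairs
  | some (_, i0) =>
    let rest := pairs.filter (fun p => p.2 != i0)                     -- [p for p in pairs if p[1] != i0]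
    match PySem.List.min2? rest Prod.fst Prod.snd with                -- min(rest)
    | none => (some i0, none)                                         -- if not rest
    | some (_, i1) => (some i0, some i1)

-- ===== PRECONDITION & SPEC =====
def Spec_findMinTwo (cost : List Int) (out : Option Int × Option Int) : Prop := out = findMinTwo_alt cost
instance (cost : List Int) (out : Option Int × Option Int) : Decidable (Spec_findMinTwo cost out) := by unfold Spec_findMinTwo; infer_instance

-- ===== CLAIM (what is proved, stated in full; the proofs are below) =====
def Claim_equal_findMinTwo : Prop := ∀ (cost : List Int), Dom_findMinTwo cost → Spec_findMinTwo cost (findMinTwo cost)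

-- ===== LEMMAS AND PROOFS =====

-- the (cost, index) pair list B builds from cost
def pairsOf (cost : List Int) : List (Int × Int) :=
  (PySem.List.enumerate cost).map (fun p => (p.2, p.1))

-- the full four-component state of A's loop, expressed with B's machinery
def refState (cost : List Int) : Option Int × Option Int × Option Int × Option Int :=
  match PySem.List.min2? (pairsOf cost) Prod.fst Prod.snd with
  | none => (none, none, none, none)
  | some (c0, i0) =>
    match PySem.List.min2? ((pairsOf cost).filter (fun p => p.2 != i0)) Prod.fst Prod.snd with
    | none => (some i0, none, some c0, none)
    | some (c1, i1) => (some i0, some i1, some c0, some c1)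

-- Python's min on 2-tuples, as the step function of min2?'s fold
def m2step (acc : Option (Int × Int)) (x : Int × Int) : Option (Int × Int) :=
  match acc with
  | none => some x
  | some m => if (decide (x.1 < m.1) || !decide (m.1 < x.1) && decide (x.2 < m.2)) = true then some x else some m

lemma min2?_eq_foldl (l : List (Int × Int)) :
    PySem.List.min2? l Prod.fst Prod.snd = l.foldl m2step none := by
  unfold PySem.List.min2?
  congr 1
  funext acc x
  cases acc with
  | none => rfl
  | some m => simp only [m2step]

lemma m2step_some_or (a b : Int × Int) : m2step (some a) b = some a ∨ m2step (some a) b = some b := by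
  rcases (decide (b.1 < a.1) || !decide (a.1 < b.1) && decide (b.2 < a.2)).eq_false_or_eq_true with h | h
  · right; simp [m2step, h]
  · left; simp [m2step, h]

lemma min2?_append_singleton (l : List (Int × Int)) (p : Int × Int) :
    PySem.List.min2? (l ++ [p]) Prod.fst Prod.snd =
      m2step (PySem.List.min2? l Prod.fst Prod.snd) p := by
  rw [min2?_eq_foldl, min2?_eq_foldl, List.foldl_append, List.foldl_cons, List.foldl_nil]

lemma foldl_m2step_some_ne_none (t : List (Int × Int)) :
    ∀ (a : Int × Int), t.foldl m2step (some a) ≠ none := by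
  induction t with
  | nil => intro a; simp
  | cons b t ih =>
    intro a
    rw [List.foldl_cons]
    rcases m2step_some_or a b with hc | hc <;> (rw [hc]; apply ih)

lemma min2?_eq_none_iff' (l : List (Int × Int)) :
    PySem.List.min2? l Prod.fst Prod.snd = none ↔ l = [] := by
  cases l with
  | nil => simp [min2?_eq_foldl]
  | cons a t =>
    rw [min2?_eq_foldl, List.foldl_cons]
    show t.foldl m2step (some a) = none ↔ _
    simp [foldl_m2step_some_ne_none t a]

lemma foldl_m2step_some_mem (t : List (Int × Int)) :
    ∀ (a m : Int × Int), t.foldl m2step (some a) = some m → m = a ∨ m ∈ t := by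
  induction t with
  | nil => intro a m h; simp at h; simp [h.symm]
  | cons b t ih =>
    intro a m h
    rw [List.foldl_cons] at h
    rcases m2step_some_or a b with hc | hc <;> rw [hc] at h <;>
      rcases ih _ m h with h' | h' <;> simp [h']

lemma min2?_mem' (l : List (Int × Int)) (m : Int × Int)
    (h : PySem.List.min2? l Prod.fst Prod.snd = some m) : m ∈ l := by
  cases l with
  | nil => simp [min2?_eq_foldl] at h
  | cons a t =>
    rw [min2?_eq_foldl, List.foldl_cons] at h
    rcases foldl_m2step_some_mem t a m h with h' | h' <;> simp [h']

-- every index in the swapped pair list is in [0, length)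
lemma pairs_snd_lt (cost : List Int) (p : Int × Int) (hp : p ∈ pairsOf cost) :
    0 ≤ p.2 ∧ p.2 < (cost.length : Int) := by
  rcases List.mem_map.1 hp with ⟨q, hq, rfl⟩
  rcases (PySem.List.mem_enumerate_iff cost 0 q).1 hq with ⟨k, hk, rfl⟩
  constructor <;> simp <;> omega

lemma pairsOf_append_singleton (xs : List Int) (x : Int) :
    pairsOf (xs ++ [x]) = pairsOf xs ++ [(x, (xs.length : Int))] := by
  unfold pairsOf
  rw [PySem.List.enumerate_append, List.map_append]
  simp [PySem.List.enumerate_cons, PySem.List.enumerate_nil]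

-- the loop invariant: A's fold equals refState
lemma fold_eq_refState (cost : List Int) :
    (PySem.List.enumerate cost).foldl findMinTwoStep (none, none, none, none) = refState cost := by
  induction cost using List.reverseRecOn with
  | nil => simp [PySem.List.enumerate_nil, refState, pairsOf, min2?_eq_foldl]
  | append_singleton xs x ih =>
    have henum : PySem.List.enumerate (xs ++ [x]) 0
        = PySem.List.enumerate xs 0 ++ [((xs.length : Int), x)] := by
      rw [PySem.List.enumerate_append]
      simp [PySem.List.enumerate_cons, PySem.List.enumerate_nil]
    rw [henum, List.foldl_append, ih, List.foldl_cons, List.foldl_nil]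
    have hsplit : PySem.List.min2? (pairsOf (xs ++ [x])) Prod.fst Prod.snd
        = m2step (PySem.List.min2? (pairsOf xs) Prod.fst Prod.snd) (x, (xs.length : Int)) := by
      rw [pairsOf_append_singleton, min2?_append_singleton]
    cases h0 : PySem.List.min2? (pairsOf xs) Prod.fst Prod.snd with
    | none =>
      have hxs : xs = [] := by
        have hnil := (min2?_eq_none_iff' _).1 h0
        unfold pairsOf at hnil
        have henil := List.map_eq_nil_iff.1 hnil
        cases xs with
        | nil => rfl
        | cons y ys => rw [PySem.List.enumerate_cons] at henil; cases henil
      subst hxs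
      simp [refState, pairsOf, PySem.List.enumerate_cons, PySem.List.enumerate_nil,
        min2?_eq_foldl, m2step, findMinTwoStep]
    | some m0 =>
      obtain ⟨c0, i0⟩ := m0
      have hi0 := pairs_snd_lt xs (c0, i0) (min2?_mem' _ _ h0)
      simp only at hi0
      rw [h0] at hsplit
      by_cases hx : x < c0
      · -- the new element is a strict new minimum
        have hmin' : PySem.List.min2? (pairsOf (xs ++ [x])) Prod.fst Prod.snd
            = some (x, (xs.length : Int)) := by
          rw [hsplit]; simp [m2step, hx]
        have hfilterself : (pairsOf xs).filter (fun p => p.2 != (xs.length : Int)) = pairsOf xs := by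
          apply List.filter_eq_self.2
          intro p hp
          have := pairs_snd_lt xs p hp
          simp only [bne_iff_ne, ne_eq]
          omega
        have hrest' : (pairsOf (xs ++ [x])).filter (fun p => p.2 != (xs.length : Int)) = pairsOf xs := by
          rw [pairsOf_append_singleton, List.filter_append, hfilterself]
          simp
        simp only [refState, hmin', hrest', h0]
        cases h1 : PySem.List.min2? ((pairsOf xs).filter (fun p => p.2 != i0)) Prod.fst Prod.snd with
        | none => simp [findMinTwoStep, hx]
        | some m1 => obtain ⟨c1, i1⟩ := m1; simp [findMinTwoStep, hx]
      · -- the old minimum survives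
        have hmin' : PySem.List.min2? (pairsOf (xs ++ [x])) Prod.fst Prod.snd = some (c0, i0) := by
          rw [hsplit]
          simp [m2step, hx, show ¬ ((xs.length : Int) < i0) by omega]
        have hrest' : (pairsOf (xs ++ [x])).filter (fun p => p.2 != i0)
            = (pairsOf xs).filter (fun p => p.2 != i0) ++ [(x, (xs.length : Int))] := by
          rw [pairsOf_append_singleton, List.filter_append]
          have hkeep : (((x, (xs.length : Int)) : Int × Int).2 != i0) = true := by
            simp only [bne_iff_ne, ne_eq]
            omega
          simp [hkeep]
        have hsplit2 : PySem.List.min2? ((pairsOf (xs ++ [x])).filter (fun p => p.2 != i0)) Prod.fst Prod.snd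
            = m2step (PySem.List.min2? ((pairsOf xs).filter (fun p => p.2 != i0)) Prod.fst Prod.snd)
                (x, (xs.length : Int)) := by
          rw [hrest', min2?_append_singleton]
        cases h1 : PySem.List.min2? ((pairsOf xs).filter (fun p => p.2 != i0)) Prod.fst Prod.snd with
        | none =>
          rw [h1] at hsplit2
          simp only [refState, h0, h1, hmin', hsplit2, m2step]
          simp [findMinTwoStep, hx]
        | some m1 =>
          obtain ⟨c1, i1⟩ := m1
          rw [h1] at hsplit2
          have hi1 := pairs_snd_lt xs (c1, i1) (List.mem_filter.1 (min2?_mem' _ _ h1)).1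
          simp only at hi1
          by_cases hx1 : x < c1
          · have hstep2 : m2step (some (c1, i1)) (x, (xs.length : Int)) = some (x, (xs.length : Int)) := by
              simp [m2step, hx1]
            rw [hstep2] at hsplit2
            simp only [refState, h0, h1, hmin', hsplit2]
            simp [findMinTwoStep, hx, hx1]
          · have hstep2 : m2step (some (c1, i1)) (x, (xs.length : Int)) = some (c1, i1) := by
              simp [m2step, hx1, show ¬ ((xs.length : Int) < i1) by omega]
            rw [hstep2] at hsplit2
            simp only [refState, h0, h1, hmin', hsplit2]
            simp [findMinTwoStep, hx, hx1]

lemma findMinTwo_alt_eq_proj (cost : List Int) :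
    findMinTwo_alt cost = ((refState cost).1, (refState cost).2.1) := by
  simp only [findMinTwo_alt, refState, pairsOf]
  cases h0 : PySem.List.min2? ((PySem.List.enumerate cost).map (fun p => (p.2, p.1))) Prod.fst Prod.snd with
  | none => simp
  | some m =>
    obtain ⟨c0, i0⟩ := m
    cases h1 : PySem.List.min2? (((PySem.List.enumerate cost).map (fun p => (p.2, p.1))).filter (fun p => p.2 != i0)) Prod.fst Prod.snd with
    | none => simp [h1]
    | some m1 => obtain ⟨c1, i1⟩ := m1; simp [h1]

-- ===== VERDICT (by name: the statement is the Claim_ definition above) =====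
theorem findMinTwo_spec : Claim_equal_findMinTwo := by
  intro cost _
  unfold Spec_findMinTwo findMinTwo
  rw [fold_eq_refState, findMinTwo_alt_eq_proj]
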